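-- pv_equiv track=rewrite | github.com/noahjacknichols/cp460 | Midterm/solution_A2.py | get_subKey
-- ===== SOURCE A (Python) =====
-- def get_subKey(password, baseString):
--     subkey = ''
--     for passChar in password:
--         if passChar not in subkey:
--             subkey+= passChar
--     for baseChar in baseString:
--         if baseChar not in subkey:
--             subkey+= baseChar
--     return subkey
-- ===== SOURCE B (Python) =====
-- def get_subKey(password, baseString):
--     def dedup(s):
--         if not s:
--             return ''
--         head = s[0]
--         return head + dedup(s[1:].replace(head, ''))
--     return dedup(password + baseString)
-- ===== Notes on version B (the rewrite author's own statement) =====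
-- stated objective: alternative
-- what changed: Replaces A's two guarded accumulation loops (membership test against the growing result) by a recursive filter-forward dedup: take the first remaining char and delete all its later copies from the rest before recursing, with no seen-set or membership test at all.
import Mathlib
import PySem

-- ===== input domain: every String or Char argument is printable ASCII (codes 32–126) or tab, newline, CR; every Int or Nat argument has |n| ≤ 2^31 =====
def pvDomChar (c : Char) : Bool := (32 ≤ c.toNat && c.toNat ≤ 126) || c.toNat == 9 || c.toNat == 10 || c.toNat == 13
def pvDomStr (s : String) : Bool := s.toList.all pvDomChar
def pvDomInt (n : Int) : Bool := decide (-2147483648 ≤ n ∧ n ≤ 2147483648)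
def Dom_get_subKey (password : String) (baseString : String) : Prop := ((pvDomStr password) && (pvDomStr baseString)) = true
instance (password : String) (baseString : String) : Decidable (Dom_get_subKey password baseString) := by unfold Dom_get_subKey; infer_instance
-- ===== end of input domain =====

-- B replaces A's two guarded accumulation loops by a recursive filter-forward
-- dedup (take next char, delete its later copies, recurse); alternative, same result.


-- ===== PORT A =====
-- subkey accumulated as a list of chars; 'c not in subkey' is the membership test.
def get_subKey (password : String) (baseString : String) : String :=
  let subkey := password.toList.foldl
    (fun sk c => if c ∈ sk then sk else sk ++ [c]) []
  let subkey := baseString.toList.foldl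
    (fun sk c => if c ∈ sk then sk else sk ++ [c]) subkey
  String.mk subkey

-- ===== PORT B =====
-- dedup(s): head + dedup(s[1:].replace(head, '')); replace of a single char = filter (· ≠ head), exact.
def pvForwardDedup : List Char → List Char
  | [] => []
  | h :: t => h :: pvForwardDedup (t.filter (· ≠ h))
termination_by l => l.length
decreasing_by
  simpa using Nat.lt_succ_of_le
    (le_trans (List.length_filter_le _ _) (le_of_eq (List.length_attach (l := t))))

def get_subKey_alt (password : String) (baseString : String) : String :=
  String.mk (pvForwardDedup (password.toList ++ baseString.toList))

-- ===== PRECONDITION & SPEC =====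
def Spec_get_subKey (password : String) (baseString : String) (out : String) : Prop := out = get_subKey_alt password baseString
instance (password : String) (baseString : String) (out : String) : Decidable (Spec_get_subKey password baseString out) := by unfold Spec_get_subKey; infer_instance

-- ===== CLAIM (what is proved, stated in full; the proofs are below) =====
def Claim_equal_get_subKey : Prop := ∀ (password : String) (baseString : String), Dom_get_subKey password baseString → Spec_get_subKey password baseString (get_subKey password baseString)

-- ===== LEMMAS AND PROOFS =====
theorem pvForwardDedup_nil : pvForwardDedup [] = [] := by
  rw [pvForwardDedup]

theorem pvForwardDedup_cons (h : Char) (t : List Char) :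
    pvForwardDedup (h :: t) = h :: pvForwardDedup (t.filter (· ≠ h)) := by
  rw [pvForwardDedup]

-- Invariant: A's guarded foldl from state 'seen' appends exactly the forward dedup
-- of the input with the already-seen characters filtered out.
theorem foldl_guard_eq_forward (l : List Char) (seen : List Char) :
    l.foldl (fun sk c => if c ∈ sk then sk else sk ++ [c]) seen
      = seen ++ pvForwardDedup (l.filter (fun x => decide (x ∉ seen))) := by
  induction hn : l.length using Nat.strong_induction_on generalizing l seen with
  | _ n ih =>
    cases l with
    | nil => simp [pvForwardDedup_nil]
    | cons h t =>
      by_cases hm : h ∈ seen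
      · rw [List.foldl_cons, if_pos hm, List.filter_cons, if_neg (by simp [hm])]
        exact ih t.length (by rw [← hn, List.length_cons]; omega) t seen rfl
      · rw [List.foldl_cons, if_neg hm, List.filter_cons, if_pos (by simp [hm]),
          pvForwardDedup_cons, ih t.length (by rw [← hn, List.length_cons]; omega) t (seen ++ [h]) rfl]
        have hf : t.filter (fun x => decide (x ∉ seen ++ [h]))
            = (t.filter (fun x => decide (x ∉ seen))).filter (fun x => decide (x ≠ h)) := by
          rw [List.filter_filter]
          apply List.filter_congr
          intro c _
          simp only [List.mem_append, List.mem_singleton, not_or, Bool.decide_and]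
          exact Bool.and_comm _ _
        rw [hf]
        simp

-- ===== VERDICT (by name: the statement is the Claim_ definition above) =====
theorem get_subKey_spec : Claim_equal_get_subKey := by
  intro password baseString _
  show _ = _
  unfold get_subKey get_subKey_alt
  dsimp only
  rw [← List.foldl_append, foldl_guard_eq_forward]
  congr 1
  simp
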